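-- pv_equiv track=rewrite | github.com/armor-ai/IDEA | src/main.py | get_candidate_sentences_ids
-- ===== SOURCE A (Python) =====
-- def get_candidate_sentences_ids(rawinput, rates):
--     sent_ids = []
--     sent_rates = []
--     index = 0
--     for t_i, rawinput_i in enumerate(rawinput):
--         sent_id = []
--         sent_rate = []
--         for i_d, input_d in enumerate(rawinput_i):
--             for i_s, input_s in enumerate(input_d):
--                 if len(input_s) < 5:          # length should be bigger than 5
--                     continue
--                 sent_id.append(index + i_s)
--                 sent_rate.append(rates[t_i][i_d])
--             index += len(input_d)
--         sent_ids.append(sent_id)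
--         sent_rates.append(sent_rate)
--     return sent_ids, sent_rates
-- ===== SOURCE B (Python) =====
-- def get_candidate_sentences_ids(rawinput, rates):
--     # Pass 1: per-block starting offsets (global prefix sums of document lengths,
--     # advancing across all topics and across fully filtered blocks alike).
--     offsets = []
--     acc = 0
--     for rawinput_i in rawinput:
--         row = []
--         for input_d in rawinput_i:
--             row.append(acc)
--             acc += len(input_d)
--         offsets.append(row)
--     # Pass 2: build both outputs by comprehension.
--     sent_ids = [[off + i_s
--                  for off, input_d in zip(row, rawinput_i)
--                  for i_s, s in enumerate(input_d)
--                  if len(s) >= 5]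
--                 for row, rawinput_i in zip(offsets, rawinput)]
--     sent_rates = [[rates[t_i][i_d]
--                    for i_d, input_d in enumerate(rawinput_i)
--                    for s in input_d
--                    if len(s) >= 5]
--                   for t_i, rawinput_i in enumerate(rawinput)]
--     return sent_ids, sent_rates
-- ===== Notes on version B (the rewrite author's own statement) =====
-- stated objective: alternative
-- what changed: Replaces A's single triple loop threading one global index through mutable accumulators by two passes: first a prefix-sum offset table over document lengths, then comprehensions that zip offsets with documents to emit ids and rates.
import Mathlib
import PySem

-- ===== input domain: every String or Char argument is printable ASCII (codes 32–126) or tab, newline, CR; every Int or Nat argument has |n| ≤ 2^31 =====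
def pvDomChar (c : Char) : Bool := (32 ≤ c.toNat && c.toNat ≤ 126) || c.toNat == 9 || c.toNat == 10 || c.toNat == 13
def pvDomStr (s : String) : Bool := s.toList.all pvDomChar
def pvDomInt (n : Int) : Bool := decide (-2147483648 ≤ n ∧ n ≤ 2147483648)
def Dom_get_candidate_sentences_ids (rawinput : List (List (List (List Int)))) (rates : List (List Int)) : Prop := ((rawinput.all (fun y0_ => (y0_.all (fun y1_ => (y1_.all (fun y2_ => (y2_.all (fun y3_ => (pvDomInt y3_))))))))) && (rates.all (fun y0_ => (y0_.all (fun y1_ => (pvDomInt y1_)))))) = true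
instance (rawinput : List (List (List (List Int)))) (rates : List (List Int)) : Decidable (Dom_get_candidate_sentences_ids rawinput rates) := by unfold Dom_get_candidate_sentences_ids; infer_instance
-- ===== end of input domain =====

-- B replaces A's single triple loop (one global index threaded through mutable
-- accumulators) by two passes: a prefix-sum offset table, then comprehensions
-- zipping offsets with documents; same cost, different decomposition.

-- ===== PORT A =====
-- literal transliteration of A's triple loop: state = (sent_ids, sent_rates, index)
def get_candidate_sentences_ids (rawinput : List (List (List (List Int)))) (rates : List (List Int)) : List (List Int) × List (List Int) :=
  let r :=
    (PySem.List.enumerate rawinput).foldl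
      (fun (st : List (List Int) × List (List Int) × Int) ti =>
        let inner :=
          (PySem.List.enumerate ti.2).foldl
            (fun (st2 : List Int × List Int × Int) dd =>
              let st3 :=
                (PySem.List.enumerate dd.2).foldl
                  (fun (st3 : List Int × List Int) ss =>
                    if ss.2.length < 5 then st3
                    else (st3.1 ++ [st2.2.2 + ss.1],
                          st3.2 ++ [PySem.List.pyGetD (PySem.List.pyGetD rates ti.1 []) dd.1 0]))
                  (st2.1, st2.2.1)
              (st3.1, st3.2, st2.2.2 + (dd.2.length : Int)))
            (([] : List Int), ([] : List Int), st.2.2)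
        (st.1 ++ [inner.1], st.2.1 ++ [inner.2.1], inner.2.2))
      (([] : List (List Int)), ([] : List (List Int)), (0 : Int))
  (r.1, r.2.1)

-- ===== PORT B =====
-- pass 1 of Source B: inner offset-row loop and outer offsets loop
def pvOffRow (acc : Int) (ti : List (List (List Int))) : List Int × Int :=
  ti.foldl (fun (st : List Int × Int) dd => (st.1 ++ [st.2], st.2 + (dd.length : Int))) ([], acc)

def pvOffsets (rawinput : List (List (List (List Int)))) : List (List Int) × Int :=
  rawinput.foldl (fun (st : List (List Int) × Int) ti =>
    let r := pvOffRow st.2 ti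
    (st.1 ++ [r.1], r.2)) ([], 0)

def get_candidate_sentences_ids_alt (rawinput : List (List (List (List Int)))) (rates : List (List Int)) : List (List Int) × List (List Int) :=
  let offsets := (pvOffsets rawinput).1
  let sent_ids :=
    (offsets.zip rawinput).map (fun p =>
      (p.1.zip p.2).flatMap (fun q =>
        ((PySem.List.enumerate q.2).filter (fun ss => 5 ≤ ss.2.length)).map (fun ss => q.1 + ss.1)))
  let sent_rates :=
    (PySem.List.enumerate rawinput).map (fun tp =>
      (PySem.List.enumerate tp.2).flatMap (fun dp =>
        (dp.2.filter (fun s => 5 ≤ s.length)).map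
          (fun _ => PySem.List.pyGetD (PySem.List.pyGetD rates tp.1 []) dp.1 0)))
  (sent_ids, sent_rates)

-- ===== PRECONDITION & SPEC =====
-- Pre_ excludes exactly the inputs on which A (and B alike) raises IndexError:
-- some document containing a sentence of length ≥ 5 has no corresponding entry rates[t][d].
def Pre_get_candidate_sentences_ids (rawinput : List (List (List (List Int)))) (rates : List (List Int)) : Prop :=
  ∀ t, ∀ _ht : t < rawinput.length, ∀ d, ∀ _hd : d < rawinput[t].length,
    (∃ s ∈ rawinput[t][d], 5 ≤ s.length) →
      ∃ hr : t < rates.length, d < rates[t].length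

instance (rawinput : List (List (List (List Int)))) (rates : List (List Int)) : Decidable (Pre_get_candidate_sentences_ids rawinput rates) := by unfold Pre_get_candidate_sentences_ids; infer_instance

def pvWitness_get_candidate_sentences_ids : List (List (List (List Int))) × List (List Int) :=
  ([[[[1, 2, 3, 4, 5], [1]], []], [[[0, 0, 0, 0, 0, 0]]]], [[7, 8], [9]])

def Spec_get_candidate_sentences_ids (rawinput : List (List (List (List Int)))) (rates : List (List Int)) (out : List (List Int) × List (List Int)) : Prop := out = get_candidate_sentences_ids_alt rawinput rates
instance (rawinput : List (List (List (List Int)))) (rates : List (List Int)) (out : List (List Int) × List (List Int)) : Decidable (Spec_get_candidate_sentences_ids rawinput rates out) := by unfold Spec_get_candidate_sentences_ids; infer_instance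

-- ===== CLAIM (what is proved, stated in full; the proofs are below) =====
def Claim_equal_get_candidate_sentences_ids : Prop := ∀ (rawinput : List (List (List (List Int)))) (rates : List (List Int)), Dom_get_candidate_sentences_ids rawinput rates → Pre_get_candidate_sentences_ids rawinput rates → Spec_get_candidate_sentences_ids rawinput rates (get_candidate_sentences_ids rawinput rates)

-- ===== LEMMAS AND PROOFS =====

-- canonical value of one topic's sent_id list, given the running global index
def pvIdsTopic : Int → List (List (List Int)) → List Int
  | _, [] => []
  | idx, d :: ds =>
      ((PySem.List.enumerate d).filter (fun ss => 5 ≤ ss.2.length)).map (fun ss => idx + ss.1)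
        ++ pvIdsTopic (idx + (d.length : Int)) ds

-- total sentence count of a topic, as Int
def pvTot (ti : List (List (List Int))) : Int := (ti.map (fun d => (d.length : Int))).sum

-- canonical value of the whole sent_ids output
def pvIdsAll : Int → List (List (List (List Int))) → List (List Int)
  | _, [] => []
  | idx, ti :: ts => pvIdsTopic idx ti :: pvIdsAll (idx + pvTot ti) ts

-- the offset rows B's first pass produces
def pvOfsList : Int → List (List (List Int)) → List Int
  | _, [] => []
  | acc, d :: ds => acc :: pvOfsList (acc + (d.length : Int)) ds

def pvOfsRows : Int → List (List (List (List Int))) → List (List Int)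
  | _, [] => []
  | acc, ti :: ts => pvOfsList acc ti :: pvOfsRows (acc + pvTot ti) ts

-- A's innermost loop in closed form (over an arbitrary enumerated list)
lemma pvA_inner (l : List (Int × List Int)) (idx rate : Int) (ids rts : List Int) :
    l.foldl
      (fun (st3 : List Int × List Int) ss =>
        if ss.2.length < 5 then st3
        else (st3.1 ++ [idx + ss.1], st3.2 ++ [rate])) (ids, rts)
    = (ids ++ (l.filter (fun ss => 5 ≤ ss.2.length)).map (fun ss => idx + ss.1),
       rts ++ (l.filter (fun ss => 5 ≤ ss.2.length)).map (fun _ => rate)) := by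
  induction l generalizing ids rts with
  | nil => simp
  | cons x l ih =>
      by_cases h : x.2.length < 5
      · have h' : ¬ (5 ≤ x.2.length) := by omega
        simp [List.foldl_cons, h, h', ih]
      · have h' : (5 ≤ x.2.length) := by omega
        simp [List.foldl_cons, h, h', ih]

-- the number of kept sentences does not depend on the enumeration start index
lemma pvFilter_enum_len (d : List (List Int)) (s : Int) :
    ((PySem.List.enumerate d s).filter (fun ss => 5 ≤ ss.2.length)).length
    = (d.filter (fun s' => 5 ≤ s'.length)).length := by
  induction d generalizing s with
  | nil => simp [PySem.List.enumerate_nil]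
  | cons x d ih =>
      by_cases h : 5 ≤ x.length
      · simp [PySem.List.enumerate_cons, h, ih]
      · simp [PySem.List.enumerate_cons, h, ih]

-- A's middle loop in closed form
lemma pvA_mid (l : List (Int × List (List Int))) (idx : Int) (ids rts : List Int) (rrow : List Int) :
    l.foldl
      (fun (st2 : List Int × List Int × Int) dd =>
        let st3 :=
          (PySem.List.enumerate dd.2).foldl
            (fun (st3 : List Int × List Int) ss =>
              if ss.2.length < 5 then st3
              else (st3.1 ++ [st2.2.2 + ss.1], st3.2 ++ [PySem.List.pyGetD rrow dd.1 0]))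
            (st2.1, st2.2.1)
        (st3.1, st3.2, st2.2.2 + (dd.2.length : Int)))
      (ids, rts, idx)
    = (ids ++ pvIdsTopic idx (l.map (fun dd => dd.2)),
       rts ++ l.flatMap (fun dp =>
         (dp.2.filter (fun s' => 5 ≤ s'.length)).map (fun _ => PySem.List.pyGetD rrow dp.1 0)),
       idx + pvTot (l.map (fun dd => dd.2))) := by
  induction l generalizing idx ids rts with
  | nil => simp [pvIdsTopic, pvTot]
  | cons x l ih =>
      simp only [List.foldl_cons]
      rw [pvA_inner]
      rw [ih]
      simp [pvIdsTopic, pvTot, List.append_assoc]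
      exact ⟨pvFilter_enum_len x.2 0, by ring⟩

-- A's outer loop in closed form
lemma pvA_outer (l : List (Int × List (List (List Int)))) (rates : List (List Int)) (idx : Int)
    (accI accR : List (List Int)) :
    l.foldl
      (fun (st : List (List Int) × List (List Int) × Int) ti =>
        let inner :=
          (PySem.List.enumerate ti.2).foldl
            (fun (st2 : List Int × List Int × Int) dd =>
              let st3 :=
                (PySem.List.enumerate dd.2).foldl
                  (fun (st3 : List Int × List Int) ss =>
                    if ss.2.length < 5 then st3
                    else (st3.1 ++ [st2.2.2 + ss.1],
                          st3.2 ++ [PySem.List.pyGetD (PySem.List.pyGetD rates ti.1 []) dd.1 0]))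
                  (st2.1, st2.2.1)
              (st3.1, st3.2, st2.2.2 + (dd.2.length : Int)))
            (([] : List Int), ([] : List Int), st.2.2)
        (st.1 ++ [inner.1], st.2.1 ++ [inner.2.1], inner.2.2))
      (accI, accR, idx)
    = (accI ++ pvIdsAll idx (l.map (fun tp => tp.2)),
       accR ++ l.map (fun tp =>
         (PySem.List.enumerate tp.2).flatMap (fun dp =>
           (dp.2.filter (fun s' => 5 ≤ s'.length)).map
             (fun _ => PySem.List.pyGetD (PySem.List.pyGetD rates tp.1 []) dp.1 0))),
       idx + ((l.map (fun tp => tp.2)).map pvTot).sum) := by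
  induction l generalizing idx accI accR with
  | nil => simp [pvIdsAll]
  | cons x l ih =>
      simp only [List.foldl_cons]
      have hmid := pvA_mid (PySem.List.enumerate x.2) idx ([] : List Int) ([] : List Int)
        (PySem.List.pyGetD rates x.1 [])
      simp only [hmid]
      rw [ih]
      have hsnd : (PySem.List.enumerate x.2).map (fun dd => dd.2) = x.2 :=
        PySem.List.map_snd_enumerate x.2 0
      simp [pvIdsAll, hsnd, List.append_assoc]
      ring

-- B's offset row loop in closed form
lemma pvOffRow_eq (acc : Int) (ti : List (List (List Int))) (pre : List Int) :
    ti.foldl (fun (st : List Int × Int) dd => (st.1 ++ [st.2], st.2 + (dd.length : Int))) (pre, acc)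
    = (pre ++ pvOfsList acc ti, acc + pvTot ti) := by
  induction ti generalizing acc pre with
  | nil => simp [pvOfsList, pvTot]
  | cons d ds ih =>
      simp only [List.foldl_cons, ih]
      simp [pvOfsList, pvTot, List.append_assoc]
      ring

-- B's offsets loop in closed form
lemma pvOffsets_eq (ts : List (List (List (List Int)))) (acc : Int) (pre : List (List Int)) :
    ts.foldl (fun (st : List (List Int) × Int) ti =>
      let r := pvOffRow st.2 ti
      (st.1 ++ [r.1], r.2)) (pre, acc)
    = (pre ++ pvOfsRows acc ts, acc + (ts.map pvTot).sum) := by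
  induction ts generalizing acc pre with
  | nil => simp [pvOfsRows]
  | cons ti ts ih =>
      have h : pvOffRow acc ti = (pvOfsList acc ti, acc + pvTot ti) := by
        unfold pvOffRow; rw [pvOffRow_eq]; simp
      simp only [List.foldl_cons]
      rw [h, ih]
      simp [pvOfsRows, List.append_assoc]
      ring

-- the first pass of B, characterised
lemma pvOffsets_char (ts : List (List (List (List Int)))) :
    (pvOffsets ts).1 = pvOfsRows 0 ts := by
  unfold pvOffsets
  rw [pvOffsets_eq]
  simp

-- zipping an offset row with the documents reproduces pvIdsTopic
lemma pvZip_ids (acc : Int) (ti : List (List (List Int))) :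
    ((pvOfsList acc ti).zip ti).flatMap (fun q =>
      ((PySem.List.enumerate q.2).filter (fun ss => 5 ≤ ss.2.length)).map (fun ss => q.1 + ss.1))
    = pvIdsTopic acc ti := by
  induction ti generalizing acc with
  | nil => simp [pvOfsList, pvIdsTopic]
  | cons d ds ih => simp [pvOfsList, pvIdsTopic, List.zip_cons_cons, ih]

-- zipping the offset rows with the topics reproduces pvIdsAll
lemma pvZip_rows (acc : Int) (ts : List (List (List (List Int)))) :
    ((pvOfsRows acc ts).zip ts).map (fun p =>
      (p.1.zip p.2).flatMap (fun q =>
        ((PySem.List.enumerate q.2).filter (fun ss => 5 ≤ ss.2.length)).map (fun ss => q.1 + ss.1)))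
    = pvIdsAll acc ts := by
  induction ts generalizing acc with
  | nil => simp [pvOfsRows, pvIdsAll]
  | cons ti ts ih => simp [pvOfsRows, pvIdsAll, List.zip_cons_cons, ih, pvZip_ids]

-- ===== VERDICT (by name: the statement is the Claim_ definition above) =====
theorem get_candidate_sentences_ids_spec : Claim_equal_get_candidate_sentences_ids := by
  intro rawinput rates _ _
  show get_candidate_sentences_ids rawinput rates = get_candidate_sentences_ids_alt rawinput rates
  unfold get_candidate_sentences_ids get_candidate_sentences_ids_alt
  rw [pvA_outer (PySem.List.enumerate rawinput) rates 0 [] []]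
  rw [pvOffsets_char]
  simp only [PySem.List.map_snd_enumerate, List.nil_append]
  rw [pvZip_rows]
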